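-- pv_equiv track=rewrite | github.com/travispvo-cyber/jobappasst | jobappasst/src/matching/taxonomy.py | extract_matched_skills
-- ===== SOURCE A (Python) =====
-- from typing import List, Set
--
-- SKILL_SYNONYMS = {
--     # Programming languages
--     "python": ["python3", "py", "python programming"],
--     "javascript": ["js", "ecmascript", "node.js", "nodejs"],
--     "sql": ["structured query language", "t-sql", "pl/sql", "mysql", "postgresql", "postgres"],
--
--     # Data tools
--     "tableau": ["tableau desktop", "tableau server"],
--     "power bi": ["powerbi", "microsoft power bi", "power-bi"],
--     "excel": ["microsoft excel", "ms excel", "spreadsheets"],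
--     "snowflake": ["snowflake data warehouse"],
--     "dbt": ["data build tool", "dbt-core"],
--
--     # Cloud platforms
--     "aws": ["amazon web services", "amazon aws"],
--     "azure": ["microsoft azure", "azure cloud"],
--     "gcp": ["google cloud", "google cloud platform"],
--
--     # Concepts
--     "data engineering": ["data engineer", "data pipeline", "etl"],
--     "data science": ["data scientist", "machine learning", "ml"],
--     "business intelligence": ["bi", "business analytics"],
--     "cybersecurity": ["cyber security", "information security", "infosec"],
--
--     # Healthcare specific
--     "epic": ["epic systems", "epic emr", "epic ehr"],
--     "cpt": ["cpt codes", "current procedural terminology"],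
--     "icd": ["icd-10", "icd codes", "international classification of diseases"],
-- }
--
-- def normalize_skill(skill: str) -> str:
--     """
--     Normalize a skill name to its canonical form.
--
--     Args:
--         skill: Skill name to normalize
--
--     Returns:
--         str: Normalized skill name (lowercase, trimmed)
--     """
--     return skill.lower().strip()
--
-- def find_skill_synonyms(skill: str) -> Set[str]:
--     """
--     Find all synonyms for a given skill.
--
--     Args:
--         skill: Skill name
--
--     Returns:
--         set: Set of skill synonyms (including the original)
--     """
--     normalized = normalize_skill(skill)
--
--     # Check if skill is a key
--     if normalized in SKILL_SYNONYMS: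
--         synonyms = {normalized}
--         synonyms.update(SKILL_SYNONYMS[normalized])
--         return synonyms
--
--     # Check if skill is in any synonym list
--     for canonical, synonym_list in SKILL_SYNONYMS.items():
--         if normalized in synonym_list or normalized == canonical:
--             result = {canonical}
--             result.update(synonym_list)
--             return result
--
--     # No synonyms found, return just the skill
--     return {normalized}
--
-- def extract_matched_skills(profile_skills: List[str], job_requirements: List[str]) -> List[str]:
--     """
--     Find skills from profile that match job requirements.
--
--     Args:
--         profile_skills: List of skills from profile
--         job_requirements: List of requirements from job
--
--     Returns:
--         list: List of matched skills
--     """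
--     matched = []
--
--     for profile_skill in profile_skills:
--         profile_syns = find_skill_synonyms(profile_skill)
--
--         for req in job_requirements:
--             req_normalized = normalize_skill(req)
--             # Check if any synonym appears in the requirement text
--             if any(syn in req_normalized for syn in profile_syns):
--                 if profile_skill not in matched:
--                     matched.append(profile_skill)
--                 break
--
--     return matched
-- ===== SOURCE B (Python) =====
-- from typing import List
--
-- # Synonym groups as a flat list of lists: each group is [canonical] + synonyms.
-- SKILL_GROUPS = [
--     ["python", "python3", "py", "python programming"],
--     ["javascript", "js", "ecmascript", "node.js", "nodejs"],
--     ["sql", "structured query language", "t-sql", "pl/sql", "mysql", "postgresql", "postgres"],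
--     ["tableau", "tableau desktop", "tableau server"],
--     ["power bi", "powerbi", "microsoft power bi", "power-bi"],
--     ["excel", "microsoft excel", "ms excel", "spreadsheets"],
--     ["snowflake", "snowflake data warehouse"],
--     ["dbt", "data build tool", "dbt-core"],
--     ["aws", "amazon web services", "amazon aws"],
--     ["azure", "microsoft azure", "azure cloud"],
--     ["gcp", "google cloud", "google cloud platform"],
--     ["data engineering", "data engineer", "data pipeline", "etl"],
--     ["data science", "data scientist", "machine learning", "ml"],
--     ["business intelligence", "bi", "business analytics"],
--     ["cybersecurity", "cyber security", "information security", "infosec"],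
--     ["epic", "epic systems", "epic emr", "epic ehr"],
--     ["cpt", "cpt codes", "current procedural terminology"],
--     ["icd", "icd-10", "icd codes", "international classification of diseases"],
-- ]
--
--
-- def _norm(s: str) -> str:
--     return s.lower().strip()
--
--
-- def _syns(normalized: str) -> List[str]:
--     # First group containing the normalized skill (no canonical appears in any
--     # synonym list, so this agrees with the dict's key-first lookup).
--     for group in SKILL_GROUPS:
--         if normalized in group:
--             return group
--     return [normalized]
--
--
-- def extract_matched_skills(profile_skills: List[str], job_requirements: List[str]) -> List[str]:
--     # Normalize every requirement ONCE and search a single '\x00'-joined blob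
--     # (the separator occurs in no synonym), instead of re-normalizing and
--     # re-scanning every requirement for every profile skill.
--     if not job_requirements:
--         return []
--     blob = "\x00".join(_norm(r) for r in job_requirements)
--     matched = []
--     for skill in profile_skills:
--         if skill not in matched and any(syn in blob for syn in _syns(_norm(skill))):
--             matched.append(skill)
--     return matched
-- ===== Notes on version B (the rewrite author's own statement) =====
-- stated objective: faster
-- what changed: B replaces A's dict + two-phase synonym lookup and inner per-requirement scan by a flat list of synonym groups searched with a single first-match pass, and normalizes every requirement once into a NUL-joined blob that each synonym is searched in.
import Mathlib
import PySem

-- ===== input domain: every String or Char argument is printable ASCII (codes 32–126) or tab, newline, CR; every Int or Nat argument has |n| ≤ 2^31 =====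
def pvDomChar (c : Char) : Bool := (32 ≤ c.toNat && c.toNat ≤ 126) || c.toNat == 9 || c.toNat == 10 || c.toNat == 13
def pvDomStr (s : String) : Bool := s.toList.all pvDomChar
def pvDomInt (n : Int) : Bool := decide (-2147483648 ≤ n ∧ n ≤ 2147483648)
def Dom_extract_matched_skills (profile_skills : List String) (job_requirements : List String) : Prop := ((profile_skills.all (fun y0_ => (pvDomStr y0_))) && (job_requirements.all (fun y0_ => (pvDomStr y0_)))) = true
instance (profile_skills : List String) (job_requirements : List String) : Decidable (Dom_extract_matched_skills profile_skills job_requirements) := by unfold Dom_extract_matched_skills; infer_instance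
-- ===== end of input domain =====

-- B normalizes each requirement once, searches a single NUL-joined blob per synonym, and
-- looks synonyms up in a flat list of groups instead of A's dict + two-phase scan.

-- ===== PORT A =====
-- module context of Source A: the synonym dict and the helpers normalize_skill / find_skill_synonyms
def SKILL_SYNONYMS : PySem.Dict String (List String) := PySem.Dict.mk [
  ("python", ["python3", "py", "python programming"]),
  ("javascript", ["js", "ecmascript", "node.js", "nodejs"]),
  ("sql", ["structured query language", "t-sql", "pl/sql", "mysql", "postgresql", "postgres"]),
  ("tableau", ["tableau desktop", "tableau server"]),
  ("power bi", ["powerbi", "microsoft power bi", "power-bi"]),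
  ("excel", ["microsoft excel", "ms excel", "spreadsheets"]),
  ("snowflake", ["snowflake data warehouse"]),
  ("dbt", ["data build tool", "dbt-core"]),
  ("aws", ["amazon web services", "amazon aws"]),
  ("azure", ["microsoft azure", "azure cloud"]),
  ("gcp", ["google cloud", "google cloud platform"]),
  ("data engineering", ["data engineer", "data pipeline", "etl"]),
  ("data science", ["data scientist", "machine learning", "ml"]),
  ("business intelligence", ["bi", "business analytics"]),
  ("cybersecurity", ["cyber security", "information security", "infosec"]),
  ("epic", ["epic systems", "epic emr", "epic ehr"]),
  ("cpt", ["cpt codes", "current procedural terminology"]),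
  ("icd", ["icd-10", "icd codes", "international classification of diseases"])]

def normalize_skill (skill : String) : String := PySem.Str.strip (PySem.Str.lower skill)

def findSynLoop (normalized : String) : List (String × List String) → PySem.Set String
  | [] => PySem.Set.ofList [normalized]
  | (canonical, synonym_list) :: rest =>
      if synonym_list.contains normalized || normalized == canonical then
        (PySem.Set.ofList [canonical]).update synonym_list
      else findSynLoop normalized rest

def find_skill_synonyms (skill : String) : PySem.Set String :=
  let normalized := normalize_skill skill
  if SKILL_SYNONYMS.contains normalized then
    (PySem.Set.ofList [normalized]).update (SKILL_SYNONYMS.getD normalized [])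
  else
    findSynLoop normalized SKILL_SYNONYMS.items

def reqLoop (profile_syns : PySem.Set String) (profile_skill : String)
    (reqs : List String) (matched : List String) : List String :=
  match reqs with
  | [] => matched
  | req :: rest =>
      if (profile_syns : List String).any (fun syn => PySem.Str.isIn syn (normalize_skill req)) then
        (if matched.contains profile_skill then matched else matched ++ [profile_skill])
      else reqLoop profile_syns profile_skill rest matched

def extract_matched_skills (profile_skills : List String) (job_requirements : List String) : List String :=
  profile_skills.foldl
    (fun matched profile_skill =>
      reqLoop (find_skill_synonyms profile_skill) profile_skill job_requirements matched) []

-- ===== PORT B =====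
-- module context of Source B: SKILL_GROUPS (each group = canonical :: synonyms) and _norm / _syns
def SKILL_GROUPS : List (List String) := [
  ["python", "python3", "py", "python programming"],
  ["javascript", "js", "ecmascript", "node.js", "nodejs"],
  ["sql", "structured query language", "t-sql", "pl/sql", "mysql", "postgresql", "postgres"],
  ["tableau", "tableau desktop", "tableau server"],
  ["power bi", "powerbi", "microsoft power bi", "power-bi"],
  ["excel", "microsoft excel", "ms excel", "spreadsheets"],
  ["snowflake", "snowflake data warehouse"],
  ["dbt", "data build tool", "dbt-core"],
  ["aws", "amazon web services", "amazon aws"],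
  ["azure", "microsoft azure", "azure cloud"],
  ["gcp", "google cloud", "google cloud platform"],
  ["data engineering", "data engineer", "data pipeline", "etl"],
  ["data science", "data scientist", "machine learning", "ml"],
  ["business intelligence", "bi", "business analytics"],
  ["cybersecurity", "cyber security", "information security", "infosec"],
  ["epic", "epic systems", "epic emr", "epic ehr"],
  ["cpt", "cpt codes", "current procedural terminology"],
  ["icd", "icd-10", "icd codes", "international classification of diseases"]]

def normSkill (s : String) : String := PySem.Str.strip (PySem.Str.lower s)

def groupSyns (normalized : String) : List String :=
  match SKILL_GROUPS.find? (fun group => group.contains normalized) with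
  | some group => group
  | none => [normalized]

def altLoop (blob : String) (matched : List String) : List String → List String
  | [] => matched
  | skill :: rest =>
      altLoop blob
        (if !matched.contains skill
            && (groupSyns (normSkill skill)).any (fun syn => PySem.Str.isIn syn blob)
         then matched ++ [skill] else matched) rest

def extract_matched_skills_alt (profile_skills : List String) (job_requirements : List String) : List String :=
  match job_requirements with
  | [] => []
  | _ :: _ =>
      altLoop (PySem.Str.join "\x00" (job_requirements.map normSkill)) [] profile_skills

-- ===== PRECONDITION & SPEC =====
def Spec_extract_matched_skills (profile_skills : List String) (job_requirements : List String) (out : List String) : Prop := out = extract_matched_skills_alt profile_skills job_requirements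
instance (profile_skills : List String) (job_requirements : List String) (out : List String) : Decidable (Spec_extract_matched_skills profile_skills job_requirements out) := by unfold Spec_extract_matched_skills; infer_instance

-- ===== CLAIM =====
def Claim_equal_extract_matched_skills : Prop := ∀ (profile_skills : List String) (job_requirements : List String), Dom_extract_matched_skills profile_skills job_requirements → Spec_extract_matched_skills profile_skills job_requirements (extract_matched_skills profile_skills job_requirements)

-- ===== LEMMAS AND PROOFS =====

theorem pv_norm_eq (s : String) : normSkill s = normalize_skill s := rfl

-- the separator splits an infix search over a join (general join/infix facts)
theorem pv_prefix_split (sep : Char) :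
    ∀ (sub p t : List Char), sep ∉ sub → sub <+: p ++ sep :: t → sub <+: p := by
  intro sub
  induction sub with
  | nil => intro p t _ _; exact List.nil_prefix
  | cons x sub' ih =>
    intro p t hsep hpre
    cases p with
    | nil =>
      simp only [List.nil_append, List.cons_prefix_cons] at hpre
      cases hpre.1
      exact (hsep (List.mem_cons_self)).elim
    | cons c p' =>
      simp only [List.cons_append, List.cons_prefix_cons] at hpre ⊢
      exact ⟨hpre.1, ih p' t (fun h => hsep (List.mem_cons_of_mem _ h)) hpre.2⟩

theorem pv_infix_split (sep : Char) (sub : List Char) (hsep : sep ∉ sub) :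
    ∀ (p t : List Char), sub <:+: p ++ sep :: t → sub <:+: p ∨ sub <:+: t := by
  intro p
  induction p with
  | nil =>
    intro t h
    simp only [List.nil_append, List.infix_cons_iff] at h
    rcases h with h | h
    · cases sub with
      | nil => exact Or.inl List.nil_infix
      | cons x s =>
        rw [List.cons_prefix_cons] at h
        cases h.1
        exact (hsep List.mem_cons_self).elim
    · exact Or.inr h
  | cons c p' ih =>
    intro t h
    rw [List.cons_append, List.infix_cons_iff] at h
    rcases h with h | h
    · exact Or.inl (pv_prefix_split sep sub (c :: p') t hsep (by simpa using h)).isInfix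
    · rcases ih t h with h' | h'
      · exact Or.inl (h'.trans (List.suffix_cons c p').isInfix)
      · exact Or.inr h'

theorem pv_join_infix (sep : Char) (sub : List Char) (hsep : sep ∉ sub) :
    ∀ (parts : List (List Char)), parts ≠ [] →
      (sub <:+: PySem.Chars.join [sep] parts ↔ ∃ p ∈ parts, sub <:+: p) := by
  intro parts
  induction parts with
  | nil => intro h; exact absurd rfl h
  | cons p rest ih =>
    intro _
    cases rest with
    | nil =>
      simp [PySem.Chars.join_singleton]
    | cons q rest' =>
      rw [PySem.Chars.join_cons_cons]
      constructor
      · intro h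
        rcases pv_infix_split sep sub hsep p _ (by simpa using h) with h' | h'
        · exact ⟨p, List.mem_cons_self, h'⟩
        · rcases (ih (by simp)).1 h' with ⟨r, hr, hsub⟩
          exact ⟨r, List.mem_cons_of_mem _ hr, hsub⟩
      · rintro ⟨r, hr, hsub⟩
        rcases List.mem_cons.1 hr with rfl | hr'
        · rw [List.append_assoc]
          exact hsub.trans (List.prefix_append _ _).isInfix
        · exact ((ih (by simp)).2 ⟨r, hr', hsub⟩).trans
            (by rw [show p ++ [sep] ++ PySem.Chars.join [sep] (q :: rest') =
                  (p ++ [sep]) ++ PySem.Chars.join [sep] (q :: rest') by simp]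
                exact (List.suffix_append _ _).isInfix)

-- NUL-freeness of everything searched
def pvFlat (items : List (String × List String)) : List String :=
  items.foldr (fun p acc => p.1 :: p.2 ++ acc) []

set_option maxHeartbeats 1000000 in
theorem pv_table_nul_free :
    (pvFlat SKILL_SYNONYMS.items).all (fun s => !(s.toList.contains '\x00')) = true := by decide

theorem pv_mem_flat :
    ∀ (items : List (String × List String)) (p : String × List String), p ∈ items →
      p.1 ∈ pvFlat items ∧ ∀ s ∈ p.2, s ∈ pvFlat items := by
  intro items
  induction items with
  | nil => intro p h; cases h
  | cons q rest ih =>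
    intro p hp
    rcases List.mem_cons.1 hp with rfl | hp'
    · constructor
      · exact List.mem_cons_self
      · intro s hs; exact List.mem_cons_of_mem _ (List.mem_append_left _ hs)
    · rcases ih p hp' with ⟨h1, h2⟩
      exact ⟨List.mem_cons_of_mem _ (List.mem_append_right _ h1),
             fun s hs => List.mem_cons_of_mem _ (List.mem_append_right _ (h2 s hs))⟩

theorem pv_lowerChar_ne_nul (c : Char) (h : pvDomChar c = true) :
    PySem.Chars.lowerChar c ≠ '\x00' := by
  intro heq
  have ht : (PySem.Chars.lowerChar c).toNat = 0 := by rw [heq]; rfl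
  unfold PySem.Chars.lowerChar PySem.Chars.isupper at ht
  unfold pvDomChar at h
  split at ht
  · next hu =>
    simp only [Bool.and_eq_true, decide_eq_true_eq, Char.le_def] at hu
    rw [Char.toNat_ofNat, if_pos] at ht
    · omega
    · have : c.toNat ≤ 90 := hu.2
      refine Or.inl ?_
      omega
  · simp only [Bool.or_eq_true, Bool.and_eq_true, decide_eq_true_eq, beq_iff_eq] at h
    omega

theorem pv_normalize_nul_free (skill : String) (h : pvDomStr skill = true) :
    '\x00' ∉ (normalize_skill skill).toList := by
  intro hmem
  rw [normalize_skill, PySem.Str.toList_strip, PySem.Str.toList_lower] at hmem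
  unfold PySem.Chars.strip PySem.Chars.rstrip PySem.Chars.lstrip at hmem
  have s0 := List.dropWhile_sublist (l := (List.dropWhile PySem.Chars.isspace (PySem.Chars.lower skill.toList)).reverse) PySem.Chars.isspace
  have s1 := s0.reverse
  simp only [List.reverse_reverse] at s1
  have s2 := s1.trans (List.dropWhile_sublist (l := PySem.Chars.lower skill.toList) PySem.Chars.isspace)
  have h1 : '\x00' ∈ PySem.Chars.lower skill.toList := s2.mem hmem
  rw [PySem.Chars.lower, List.mem_map] at h1
  rcases h1 with ⟨c, hc, hlc⟩
  have hd : pvDomChar c = true := List.all_eq_true.1 h c hc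
  exact pv_lowerChar_ne_nul c hd hlc

-- A's lookup and B's lookup produce the same SET of synonyms
set_option maxHeartbeats 1000000 in
theorem pv_groups_eq_items :
    SKILL_GROUPS = SKILL_SYNONYMS.items.map (fun p => p.1 :: p.2) := by decide

set_option maxHeartbeats 1000000 in
theorem pv_no_key_in_syns :
    (SKILL_SYNONYMS.items.all (fun p =>
      SKILL_SYNONYMS.items.all (fun q => !q.2.contains p.1))) = true := by decide

theorem pv_find?_congr {α : Type} (p q : α → Bool) :
    ∀ (l : List α), (∀ x ∈ l, p x = q x) → l.find? p = l.find? q := by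
  intro l
  induction l with
  | nil => intro _; rfl
  | cons x rest ih =>
    intro h
    rw [List.find?_cons, List.find?_cons, h x List.mem_cons_self]
    split
    · rfl
    · exact ih (fun y hy => h y (List.mem_cons_of_mem _ hy))

theorem pv_findSynLoop_eq (n : String) :
    ∀ (items : List (String × List String)),
      findSynLoop n items =
        match items.find? (fun p => p.2.contains n || n == p.1) with
        | some p => (PySem.Set.ofList [p.1]).update p.2
        | none => PySem.Set.ofList [n] := by
  intro items
  induction items with
  | nil => rfl
  | cons q rest ih =>
    rcases q with ⟨canonical, synonym_list⟩
    rw [findSynLoop]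
    by_cases h : (synonym_list.contains n || n == canonical) = true
    · rw [if_pos h, List.find?_cons_of_pos (by simpa using h)]
    · rw [if_neg h, List.find?_cons_of_neg (by simpa using h), ih]

theorem pv_mem_syns (skill syn : String) :
    syn ∈ find_skill_synonyms skill ↔ syn ∈ groupSyns (normalize_skill skill) := by
  have hbc : ∀ a b : String, (a == b) = (b == a) := by
    intro a b
    rw [Bool.eq_iff_iff]
    simp only [beq_iff_eq]
    exact eq_comm
  have hnokey : ∀ p ∈ SKILL_SYNONYMS.items, ∀ q ∈ SKILL_SYNONYMS.items, q.2.contains p.1 = false := by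
    intro p hp q hq
    have := List.all_eq_true.1 (List.all_eq_true.1 pv_no_key_in_syns p hp) q hq
    simpa using this
  rw [find_skill_synonyms, groupSyns, pv_groups_eq_items, List.find?_map]
  by_cases hc : SKILL_SYNONYMS.contains (normalize_skill skill) = true
  · rw [if_pos hc]
    -- normalize_skill skill is a key: no synonym list contains it, both predicates are "p.1 == it"
    have hcontains := hc
    rw [show SKILL_SYNONYMS.contains (normalize_skill skill) =
          SKILL_SYNONYMS.items.any (fun p => p.1 == normalize_skill skill) from rfl,
        List.any_eq_true] at hcontains
    rcases hcontains with ⟨pk, hpk, hpkeq⟩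
    have hkeyn : pk.1 = normalize_skill skill := by simpa using hpkeq
    have hnonotin : ∀ q ∈ SKILL_SYNONYMS.items, q.2.contains (normalize_skill skill) = false := by
      intro q hq
      have := hnokey pk hpk q hq
      rwa [hkeyn] at this
    have hfind : SKILL_SYNONYMS.items.find? ((fun g => g.contains (normalize_skill skill)) ∘ fun p => p.1 :: p.2) =
        SKILL_SYNONYMS.items.find? (fun p => p.1 == normalize_skill skill) := by
      apply pv_find?_congr
      intro q hq
      simp only [Function.comp, List.contains_cons, hnonotin q hq, Bool.or_false]
      exact hbc _ _
    rw [hfind]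
    have hsome : (SKILL_SYNONYMS.items.find? (fun p => p.1 == normalize_skill skill)).isSome = true := by
      rw [List.find?_isSome]
      exact ⟨pk, hpk, hpkeq⟩
    rcases Option.isSome_iff_exists.1 hsome with ⟨p₀, hp₀⟩
    have hp₀n : p₀.1 = normalize_skill skill := by simpa using List.find?_some hp₀
    have hgetD : SKILL_SYNONYMS.getD (normalize_skill skill) [] = p₀.2 := by
      rw [PySem.Dict.getD_eq_get?_getD,
          show SKILL_SYNONYMS.get? (normalize_skill skill) =
            ((SKILL_SYNONYMS.items.find? (fun p => p.1 == normalize_skill skill)).map (·.2)) from rfl,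
          hp₀]
      rfl
    rw [hp₀, hgetD, PySem.Set.mem_update, PySem.Set.mem_ofList]
    simp [hp₀n, List.mem_cons]
  · rw [if_neg hc]
    -- not a key: both predicates are "p.2.contains it"
    have hnokeyn : ∀ q ∈ SKILL_SYNONYMS.items, (q.1 == normalize_skill skill) = false := by
      intro q hq
      by_contra h
      apply hc
      rw [show SKILL_SYNONYMS.contains (normalize_skill skill) =
            SKILL_SYNONYMS.items.any (fun p => p.1 == normalize_skill skill) from rfl,
          List.any_eq_true]
      exact ⟨q, hq, by simpa using h⟩
    rw [pv_findSynLoop_eq]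
    have hfind : SKILL_SYNONYMS.items.find? (fun p => p.2.contains (normalize_skill skill) || normalize_skill skill == p.1) =
        SKILL_SYNONYMS.items.find? ((fun g => g.contains (normalize_skill skill)) ∘ fun p => p.1 :: p.2) := by
      apply pv_find?_congr
      intro q hq
      simp only [Function.comp, List.contains_cons]
      exact Bool.or_comm _ _
    rw [← hfind]
    rcases hfo : SKILL_SYNONYMS.items.find? (fun p => p.2.contains (normalize_skill skill) || normalize_skill skill == p.1) with _ | p₀
    · rw [hfo]
      simp [PySem.Set.mem_ofList]
    · rw [hfo]
      rw [PySem.Set.mem_update, PySem.Set.mem_ofList]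
      simp [List.mem_cons]

theorem pv_syn_no_nul (skill syn : String) (hdom : pvDomStr skill = true)
    (hmem : syn ∈ find_skill_synonyms skill) : '\x00' ∉ syn.toList := by
  have hflat : ∀ s : String, s ∈ pvFlat SKILL_SYNONYMS.items → '\x00' ∉ s.toList := by
    intro s hs
    simpa using List.all_eq_true.1 pv_table_nul_free s hs
  rw [pv_mem_syns, groupSyns, pv_groups_eq_items, List.find?_map] at hmem
  rcases hfo : SKILL_SYNONYMS.items.find? ((fun g => g.contains (normalize_skill skill)) ∘ fun p => p.1 :: p.2)
      with _ | p₀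
  · rw [hfo] at hmem
    simp only [Option.map_none, List.mem_singleton] at hmem
    exact hmem ▸ pv_normalize_nul_free skill hdom
  · rw [hfo] at hmem
    simp only [Option.map_some, List.mem_cons] at hmem
    have hp₀ : p₀ ∈ SKILL_SYNONYMS.items := List.mem_of_find?_eq_some hfo
    rcases pv_mem_flat SKILL_SYNONYMS.items p₀ hp₀ with ⟨h1, h2⟩
    rcases hmem with rfl | hmem'
    · exact hflat _ h1
    · exact hflat syn (h2 syn hmem')

-- loop shapes
theorem pv_reqLoop_eq (syns : PySem.Set String) (skill : String) :
    ∀ (reqs : List String) (matched : List String),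
      reqLoop syns skill reqs matched =
        if reqs.any (fun r => (syns : List String).any (fun syn => PySem.Str.isIn syn (normalize_skill r))) then
          (if matched.contains skill then matched else matched ++ [skill])
        else matched := by
  intro reqs
  induction reqs with
  | nil => intro matched; simp [reqLoop]
  | cons req rest ih =>
    intro matched
    rw [reqLoop, List.any_cons]
    by_cases h : (syns : List String).any (fun syn => PySem.Str.isIn syn (normalize_skill req)) = true
    · rw [if_pos h, h, Bool.true_or, if_pos rfl]
    · rw [if_neg h, ih]
      simp only [Bool.not_eq_true] at h
      rw [h, Bool.false_or]

theorem pv_altLoop_eq_foldl (blob : String) :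
    ∀ (skills matched : List String),
      altLoop blob matched skills =
        skills.foldl (fun m skill =>
          if !m.contains skill
              && (groupSyns (normSkill skill)).any (fun syn => PySem.Str.isIn syn blob)
          then m ++ [skill] else m) matched := by
  intro skills
  induction skills with
  | nil => intro matched; rfl
  | cons s rest ih => intro matched; rw [altLoop, List.foldl_cons, ih]

-- per skill: searching the blob = searching some requirement
theorem pv_any_blob (skill : String) (hdom : pvDomStr skill = true)
    (req : String) (rest : List String) :
    ((groupSyns (normSkill skill)).any
        (fun syn => PySem.Str.isIn syn (PySem.Str.join "\x00" ((req :: rest).map normSkill)))) =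
      ((req :: rest).any (fun r => (find_skill_synonyms skill : List String).any
        (fun syn => PySem.Str.isIn syn (normalize_skill r)))) := by
  rw [Bool.eq_iff_iff]
  simp only [List.any_eq_true]
  constructor
  · rintro ⟨syn, hsyn, hin⟩
    rw [pv_norm_eq, ← pv_mem_syns] at hsyn
    rw [PySem.Str.isIn_iff_infix, PySem.Str.toList_join] at hin
    have hnul := pv_syn_no_nul skill syn hdom hsyn
    have hj := (pv_join_infix '\x00' syn.toList hnul
        (((req :: rest).map normSkill).map String.toList) (by simp)).1
        (by simpa using hin)
    rcases hj with ⟨p, hp, hinf⟩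
    rw [List.mem_map] at hp
    rcases hp with ⟨r0, hr0, rfl⟩
    rw [List.mem_map] at hr0
    rcases hr0 with ⟨r, hr, rfl⟩
    exact ⟨r, hr, ⟨syn, hsyn, (PySem.Str.isIn_iff_infix _ _).2 (by rwa [pv_norm_eq] at hinf)⟩⟩
  · rintro ⟨r, hr, syn, hsyn, hin⟩
    refine ⟨syn, by rwa [pv_norm_eq, ← pv_mem_syns], ?_⟩
    rw [PySem.Str.isIn_iff_infix, PySem.Str.toList_join]
    have hnul := pv_syn_no_nul skill syn hdom hsyn
    have := (pv_join_infix '\x00' syn.toList hnul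
        (((req :: rest).map normSkill).map String.toList) (by simp)).2
        ⟨(normSkill r).toList, by
          simp only [List.map_map, List.mem_map]
          exact ⟨r, hr, rfl⟩, (PySem.Str.isIn_iff_infix _ _).1 (by rwa [pv_norm_eq])⟩
    simpa using this

theorem pv_fold_nilreqs : ∀ (ps m : List String),
    ps.foldl (fun matched profile_skill =>
      reqLoop (find_skill_synonyms profile_skill) profile_skill [] matched) m = m := by
  intro ps
  induction ps with
  | nil => intro m; rfl
  | cons s t ih => intro m; exact ih m

theorem pv_main : ∀ (ps reqs : List String),
    ((ps.all (fun y => pvDomStr y)) && (reqs.all (fun y => pvDomStr y))) = true →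
    extract_matched_skills ps reqs = extract_matched_skills_alt ps reqs := by
  intro ps reqs hdom
  rw [Bool.and_eq_true] at hdom
  cases reqs with
  | nil =>
    rw [extract_matched_skills, extract_matched_skills_alt]
    exact pv_fold_nilreqs ps []
  | cons req rest =>
    rw [extract_matched_skills, extract_matched_skills_alt, pv_altLoop_eq_foldl]
    apply PySem.List.foldl_congr_mem
    intro acc skill hskill
    have hd : pvDomStr skill = true := List.all_eq_true.1 hdom.1 skill hskill
    rw [pv_reqLoop_eq, ← pv_any_blob skill hd req rest]
    by_cases h : ((groupSyns (normSkill skill)).any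
        (fun syn => PySem.Str.isIn syn (PySem.Str.join "\x00" ((req :: rest).map normSkill)))) = true
    · rw [if_pos h, h, Bool.and_true]
      by_cases hc : acc.contains skill = true
      · rw [if_pos hc, hc]; rfl
      · rw [if_neg hc]; simp only [Bool.not_eq_true] at hc; rw [hc]; rfl
    · simp only [Bool.not_eq_true] at h
      rw [h, if_neg (by simp), Bool.and_false, if_neg (by simp)]

-- ===== VERDICT =====
theorem extract_matched_skills_spec : Claim_equal_extract_matched_skills := by
  intro ps reqs hdom
  exact pv_main ps reqs hdom
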